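-- pv_equiv track=rewrite | github.com/bjornwictorin/aoc2022 | day23/move_elves2.py | has_neighbors
-- ===== SOURCE A (Python) =====
-- from typing import Dict, Tuple, Set
--
-- def has_neighbors(elf: Tuple[int, int], elf_set: Set[Tuple[int, int]]) -> bool:
--     for yy in (elf[1] - 1, elf[1], elf[1] + 1):
--         for xx in (elf[0] - 1, elf[0], elf[0] + 1):
--             coord = (xx, yy)
--             if coord == (elf[0], elf[1]):
--                 continue
--             if coord in elf_set:
--                 return True
--     return False
-- ===== SOURCE B (Python) =====
-- def has_neighbors(elf, elf_set):
--     ex, ey = elf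
--     return any(max(abs(x - ex), abs(y - ey)) == 1 for (x, y) in elf_set)
-- ===== Notes on version B (the rewrite author's own statement) =====
-- stated objective: alternative
-- what changed: B scans elf_set once and tests each point's Chebyshev distance to elf (max(abs dx, abs dy) == 1) instead of A's generate-the-8-neighbor-cells-and-test-membership nested loops; correct because a cell is one of the 8 neighbors exactly when its Chebyshev distance to elf is 1.
import Mathlib
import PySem

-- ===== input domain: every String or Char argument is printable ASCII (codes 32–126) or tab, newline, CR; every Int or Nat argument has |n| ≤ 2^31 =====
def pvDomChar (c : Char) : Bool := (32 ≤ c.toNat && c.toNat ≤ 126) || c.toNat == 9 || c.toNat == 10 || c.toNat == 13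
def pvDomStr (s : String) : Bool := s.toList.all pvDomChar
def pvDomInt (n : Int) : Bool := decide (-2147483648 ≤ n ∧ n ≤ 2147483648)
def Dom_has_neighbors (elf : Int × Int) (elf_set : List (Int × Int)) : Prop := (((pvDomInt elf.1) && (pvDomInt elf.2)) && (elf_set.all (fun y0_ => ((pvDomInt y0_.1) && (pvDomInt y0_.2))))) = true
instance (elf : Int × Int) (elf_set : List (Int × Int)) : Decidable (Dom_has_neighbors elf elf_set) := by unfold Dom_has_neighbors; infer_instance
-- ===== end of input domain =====

-- B scans elf_set once, testing each point's Chebyshev distance to elf, instead of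
-- A's generation of the 8 neighbor cells with a membership test per cell (alternative).

-- ===== PORT A =====
-- inner loop 'for xx in (elf[0]-1, elf[0], elf[0]+1)' with continue / early return
def hnInner (elf : Int × Int) (elf_set : List (Int × Int)) (yy : Int) : List Int → Bool
  | [] => false
  | xx :: rest =>
    let coord := (xx, yy)
    if coord = (elf.1, elf.2) then hnInner elf elf_set yy rest
    else if elf_set.contains coord then true
    else hnInner elf elf_set yy rest

-- outer loop 'for yy in (elf[1]-1, elf[1], elf[1]+1)' propagating the early return
def hnOuter (elf : Int × Int) (elf_set : List (Int × Int)) : List Int → Bool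
  | [] => false
  | yy :: rest =>
    if hnInner elf elf_set yy [elf.1 - 1, elf.1, elf.1 + 1] then true
    else hnOuter elf elf_set rest

def has_neighbors (elf : Int × Int) (elf_set : List (Int × Int)) : Bool :=
  hnOuter elf elf_set [elf.2 - 1, elf.2, elf.2 + 1]

-- ===== PORT B =====
-- 'any(max(abs(x - ex), abs(y - ey)) == 1 for (x, y) in elf_set)'
def has_neighbors_alt (elf : Int × Int) (elf_set : List (Int × Int)) : Bool :=
  elf_set.any (fun p => max (p.1 - elf.1).natAbs (p.2 - elf.2).natAbs == 1)

-- ===== PRECONDITION & SPEC =====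
def Spec_has_neighbors (elf : Int × Int) (elf_set : List (Int × Int)) (out : Bool) : Prop := out = has_neighbors_alt elf elf_set
instance (elf : Int × Int) (elf_set : List (Int × Int)) (out : Bool) : Decidable (Spec_has_neighbors elf elf_set out) := by unfold Spec_has_neighbors; infer_instance

-- ===== CLAIM (what is proved, stated in full; the proofs are below) =====
def Claim_equal_has_neighbors : Prop := ∀ (elf : Int × Int) (elf_set : List (Int × Int)), Dom_has_neighbors elf elf_set → Spec_has_neighbors elf elf_set (has_neighbors elf elf_set)

-- ===== LEMMAS AND PROOFS =====

-- A's nested early-return scan equals the ||-chain of the 8 membership tests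
theorem hn_a_eq (x y : Int) (s : List (Int × Int)) :
    has_neighbors (x, y) s =
      (s.contains (x-1,y-1) || s.contains (x,y-1) || s.contains (x+1,y-1) ||
       s.contains (x-1,y) || s.contains (x+1,y) ||
       s.contains (x-1,y+1) || s.contains (x,y+1) || s.contains (x+1,y+1)) := by
  have e1 : ¬(x - 1 = x) := by omega
  have e2 : ¬(x + 1 = x) := by omega
  have e3 : ¬(y - 1 = y) := by omega
  have e4 : ¬(y + 1 = y) := by omega
  simp only [has_neighbors, hnOuter, hnInner, Prod.mk.injEq, e1, e2, e3, e4,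
    and_false, and_true, if_false, and_self, if_pos]
  cases s.contains ((x-1,y-1) : Int × Int) <;>
  cases s.contains ((x,y-1) : Int × Int) <;>
  cases s.contains ((x+1,y-1) : Int × Int) <;>
  cases s.contains ((x-1,y) : Int × Int) <;>
  cases s.contains ((x+1,y) : Int × Int) <;>
  cases s.contains ((x-1,y+1) : Int × Int) <;>
  cases s.contains ((x,y+1) : Int × Int) <;>
  cases s.contains ((x+1,y+1) : Int × Int) <;> rfl

-- a point has Chebyshev distance 1 to (ex, ey) exactly when it is one of the 8 neighbors
theorem cheb_one (ex ey x y : Int) :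
    (max (x - ex).natAbs (y - ey).natAbs = 1) ↔
      ((x,y) = ((ex-1,ey-1) : Int × Int) ∨ (x,y) = (ex,ey-1) ∨ (x,y) = (ex+1,ey-1) ∨
       (x,y) = (ex-1,ey) ∨ (x,y) = (ex+1,ey) ∨
       (x,y) = (ex-1,ey+1) ∨ (x,y) = (ex,ey+1) ∨ (x,y) = (ex+1,ey+1)) := by
  simp only [Prod.mk.injEq]
  omega

-- B's scan succeeds exactly when one of the 8 neighbors is in s
theorem hn_b_iff (x y : Int) (s : List (Int × Int)) :
    has_neighbors_alt (x, y) s = true ↔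
      ((x-1,y-1) ∈ s ∨ (x,y-1) ∈ s ∨ (x+1,y-1) ∈ s ∨ (x-1,y) ∈ s ∨ (x+1,y) ∈ s ∨
       (x-1,y+1) ∈ s ∨ (x,y+1) ∈ s ∨ (x+1,y+1) ∈ s) := by
  simp only [has_neighbors_alt, List.any_eq_true, beq_iff_eq]
  constructor
  · rintro ⟨⟨px, py⟩, hmem, hd⟩
    rcases (cheb_one x y px py).mp hd with h | h | h | h | h | h | h | h <;>
      rw [h] at hmem <;> tauto
  · rintro (h | h | h | h | h | h | h | h) <;>
      exact ⟨_, h, (cheb_one x y _ _).mpr (by simp)⟩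

-- ===== VERDICT (by name: the statement is the Claim_ definition above) =====
theorem has_neighbors_spec : Claim_equal_has_neighbors := by
  rintro ⟨x, y⟩ s _
  unfold Spec_has_neighbors
  rw [hn_a_eq, Bool.eq_iff_iff, hn_b_iff]
  simp [List.contains_eq_mem]
  tauto
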